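-- pv_equiv track=rewrite | github.com/athallabf/Kriptanalisis | soal-5/decrypt_image.py | find_affine_key
-- ===== SOURCE A (Python) =====
-- def find_affine_key(p1, c1, p2, c2, n):
--     # Mencari invers modular
--     def mod_inverse(a, m):
--         for x in range(1, m):
--             if (a * x) % m == 1:
--                 return x
--         return None
--
--     # Mencari perbedaan
--     diff_p = (p1 - p2) % n
--     diff_c = (c1 - c2) % n
--
--     # Cari m (slope)
--     m_inv = mod_inverse(diff_p, n)
--     if m_inv is None:
--         return None
--
--     m = (diff_c * m_inv) % n
--
--     # Cari b (intercept)
--     b = (c1 - (m * p1)) % n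
--
--     return m, b
-- ===== SOURCE B (Python) =====
-- def find_affine_key(p1, c1, p2, c2, n):
--     # Extended Euclid (coefficient-of-a only) instead of brute-force search for the inverse.
--     def egcd(a, b):
--         x0, x1 = 1, 0
--         while b:
--             q = a // b
--             a, b = b, a - q * b
--             x0, x1 = x1, x0 - q * x1
--         return a, x0
--
--     diff_p = (p1 - p2) % n
--     diff_c = (c1 - c2) % n
--
--     if n <= 1:
--         return None
--     g, inv = egcd(diff_p, n)
--     if g != 1:
--         return None
--
--     m = (diff_c * inv) % n
--     b = (c1 - m * p1) % n
--     return m, b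
-- ===== Notes on version B (the rewrite author's own statement) =====
-- stated objective: faster
-- what changed: B replaces A's brute-force scan of all residues 1..n-1 for the modular inverse by one extended-Euclidean pass (tracking only the coefficient of a), plus an explicit n<=1 guard where A's empty range made the scan vacuously fail.
import Mathlib
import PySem

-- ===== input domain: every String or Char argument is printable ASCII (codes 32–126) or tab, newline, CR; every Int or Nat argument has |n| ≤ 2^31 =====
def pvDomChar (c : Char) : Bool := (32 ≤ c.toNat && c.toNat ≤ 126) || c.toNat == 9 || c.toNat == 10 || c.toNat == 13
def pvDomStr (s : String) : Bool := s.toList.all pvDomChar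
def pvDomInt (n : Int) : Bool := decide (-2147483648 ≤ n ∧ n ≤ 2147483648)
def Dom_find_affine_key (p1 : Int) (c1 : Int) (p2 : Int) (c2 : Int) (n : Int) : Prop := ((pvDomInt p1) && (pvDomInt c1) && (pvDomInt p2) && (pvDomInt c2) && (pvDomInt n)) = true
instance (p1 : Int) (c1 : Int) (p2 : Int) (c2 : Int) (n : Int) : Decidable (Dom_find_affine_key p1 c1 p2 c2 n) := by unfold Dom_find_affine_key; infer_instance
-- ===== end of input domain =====

-- B replaces A's O(n) brute-force search for the modular inverse by the extended
-- Euclidean algorithm (O(log n)); equal return values proved for all n ≠ 0.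

-- ===== PORT A =====
-- inner helper mod_inverse: 'for x in range(1, m): if (a*x) % m == 1: return x; return None'
def modInverseA (a m : Int) : Option Int :=
  (PySem.List.pyRange 1 m 1).find? (fun x => PySem.Int.mod (a * x) m == 1)

def find_affine_key (p1 : Int) (c1 : Int) (p2 : Int) (c2 : Int) (n : Int) : Option (List Int) :=
  let diff_p := PySem.Int.mod (p1 - p2) n
  let diff_c := PySem.Int.mod (c1 - c2) n
  match modInverseA diff_p n with
  | none => none
  | some m_inv =>
    let m := PySem.Int.mod (diff_c * m_inv) n
    let b := PySem.Int.mod (c1 - m * p1) n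
    some [m, b]

-- ===== PORT B =====
-- termination helper for the egcd loop: the new b is a - (a//b)*b, i.e. a mod b
theorem egcd_dec (a b : Int) (hb : ¬ b = 0) :
    (a - PySem.Int.floordiv a b * b).natAbs < b.natAbs := by
  have h := PySem.Int.floordiv_mul_add_mod a b
  rcases lt_or_gt_of_ne hb with h1 | h1
  · have h2 := PySem.Int.mod_neg_bounds a h1
    omega
  · have h2 := PySem.Int.mod_nonneg a h1
    have h3 := PySem.Int.mod_lt a h1
    omega

-- 'while b: q = a//b; a, b = b, a - q*b; x0, x1 = x1, x0 - q*x1; return a, x0'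
def egcdLoop (a b x0 x1 : Int) : Int × Int :=
  if hb : b = 0 then (a, x0)
  else -- q = a // b, inlined
    egcdLoop b (a - PySem.Int.floordiv a b * b) x1 (x0 - PySem.Int.floordiv a b * x1)
termination_by b.natAbs
decreasing_by exact egcd_dec a b hb

def find_affine_key_alt (p1 : Int) (c1 : Int) (p2 : Int) (c2 : Int) (n : Int) : Option (List Int) :=
  let diff_p := PySem.Int.mod (p1 - p2) n
  let diff_c := PySem.Int.mod (c1 - c2) n
  if n ≤ 1 then none
  else
    let gi := egcdLoop diff_p n 1 0
    if gi.1 ≠ 1 then none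
    else
      let m := PySem.Int.mod (diff_c * gi.2) n
      let b := PySem.Int.mod (c1 - m * p1) n
      some [m, b]

-- ===== PRECONDITION & SPEC =====
-- Pre_ excludes exactly n = 0, where Python's '% n' raises ZeroDivisionError (in A and in B).
def Pre_find_affine_key (p1 : Int) (c1 : Int) (p2 : Int) (c2 : Int) (n : Int) : Prop := n ≠ 0
instance (p1 : Int) (c1 : Int) (p2 : Int) (c2 : Int) (n : Int) : Decidable (Pre_find_affine_key p1 c1 p2 c2 n) := by unfold Pre_find_affine_key; infer_instance
def pvWitness_find_affine_key : Int × Int × Int × Int × Int := (2, 5, 3, 8, 26)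

def Spec_find_affine_key (p1 : Int) (c1 : Int) (p2 : Int) (c2 : Int) (n : Int) (out : Option (List Int)) : Prop := out = find_affine_key_alt p1 c1 p2 c2 n
instance (p1 : Int) (c1 : Int) (p2 : Int) (c2 : Int) (n : Int) (out : Option (List Int)) : Decidable (Spec_find_affine_key p1 c1 p2 c2 n out) := by unfold Spec_find_affine_key; infer_instance

-- ===== CLAIM (what is proved, stated in full; the proofs are below) =====
def Claim_equal_find_affine_key : Prop := ∀ (p1 : Int) (c1 : Int) (p2 : Int) (c2 : Int) (n : Int), Dom_find_affine_key p1 c1 p2 c2 n → Pre_find_affine_key p1 c1 p2 c2 n → Spec_find_affine_key p1 c1 p2 c2 n (find_affine_key p1 c1 p2 c2 n)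

-- ===== LEMMAS AND PROOFS =====

-- the result of the egcd loop divides both of its first two arguments
theorem egcdLoop_dvd (a b x0 x1 : Int) :
    (egcdLoop a b x0 x1).1 ∣ a ∧ (egcdLoop a b x0 x1).1 ∣ b := by
  induction a, b, x0, x1 using egcdLoop.induct with
  | case1 a x0 x1 =>
    rw [egcdLoop]
    exact ⟨dvd_refl a, dvd_zero a⟩
  | case2 a b x0 x1 hb ih =>
    rw [egcdLoop, dif_neg hb]
    refine ⟨?_, ih.1⟩
    have h := dvd_add ih.2 (Dvd.dvd.mul_left ih.1 (PySem.Int.floordiv a b))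
    simpa using h

-- when the loop starts with 0 < b its result is positive
theorem egcdLoop_pos (a b x0 x1 : Int) (hb : 0 < b) : 0 < (egcdLoop a b x0 x1).1 := by
  induction a, b, x0, x1 using egcdLoop.induct with
  | case1 a x0 x1 => omega
  | case2 a b x0 x1 hb' ih =>
    rw [egcdLoop, dif_neg hb']
    by_cases h0 : a - PySem.Int.floordiv a b * b = 0
    · rw [h0, egcdLoop]
      simpa using hb
    · apply ih
      have h := PySem.Int.floordiv_mul_add_mod a b
      have h2 := PySem.Int.mod_nonneg a hb
      omega

-- Bezout-style invariant modulo n': the returned coefficient x0 witnesses the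
-- returned gcd as a combination of A (mod n')
theorem egcdLoop_lin (A n' : Int) : ∀ (a b x0 x1 : Int),
    n' ∣ (a - x0 * A) → n' ∣ (b - x1 * A) →
    n' ∣ ((egcdLoop a b x0 x1).1 - (egcdLoop a b x0 x1).2 * A) := by
  intro a b x0 x1
  induction a, b, x0, x1 using egcdLoop.induct with
  | case1 a x0 x1 => intro h1 _; rw [egcdLoop]; exact h1
  | case2 a b x0 x1 hb ih =>
    intro h1 h2
    rw [egcdLoop, dif_neg hb]
    apply ih h2
    have h := dvd_sub h1 (Dvd.dvd.mul_left h2 (PySem.Int.floordiv a b))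
    have heq : a - x0 * A - PySem.Int.floordiv a b * (b - x1 * A)
        = a - PySem.Int.floordiv a b * b - (x0 - PySem.Int.floordiv a b * x1) * A := by ring
    rwa [heq] at h

-- congruent arguments have equal Python mod (positive modulus)
theorem pymod_congr {x y n : Int} (hn : 0 < n) (h : n ∣ x - y) :
    PySem.Int.mod x n = PySem.Int.mod y n := by
  rw [PySem.Int.mod_eq_emod_of_pos hn, PySem.Int.mod_eq_emod_of_pos hn,
      Int.emod_eq_emod_iff_emod_sub_eq_zero]
  exact Int.emod_eq_zero_of_dvd h

theorem pymod_eq_one {x n : Int} (hn : 1 < n) (h : n ∣ x - 1) :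
    PySem.Int.mod x n = 1 := by
  have := pymod_congr (x := x) (y := 1) (by omega) h
  rw [this, PySem.Int.mod_eq_emod_of_pos (by omega)]
  exact Int.emod_eq_of_lt (by omega) hn

theorem pymod_dvd_sub_one {x n : Int} (hn : 1 < n)
    (h : PySem.Int.mod x n = 1) : n ∣ x - 1 := by
  rw [PySem.Int.mod_eq_emod_of_pos (by omega)] at h
  have h1 : (1 : Int) % n = 1 := Int.emod_eq_of_lt (by omega) hn
  have : (x - 1) % n = 0 := by
    rw [← Int.emod_eq_emod_iff_emod_sub_eq_zero, h, h1]
  exact Int.dvd_of_emod_eq_zero this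

theorem find_affine_key_spec : Claim_equal_find_affine_key := by
  unfold Claim_equal_find_affine_key
  intro p1 c1 p2 c2 n _ hpre
  unfold Pre_find_affine_key at hpre
  unfold Spec_find_affine_key find_affine_key find_affine_key_alt modInverseA
  simp only []
  by_cases hn : n ≤ 1
  · -- range(1, n) is empty, A's search returns None; B's n ≤ 1 guard returns None
    rw [if_pos hn]
    have hnone : (PySem.List.pyRange 1 n 1).find?
        (fun x => PySem.Int.mod (PySem.Int.mod (p1 - p2) n * x) n == 1) = none := by
      rw [List.find?_eq_none]
      intro x hx
      have := PySem.List.mem_pyRange_one.mp hx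
      omega
    rw [hnone]
  · rw [not_le] at hn
    rw [if_neg (by omega)]
    set a := PySem.Int.mod (p1 - p2) n with ha_def
    set c := PySem.Int.mod (c1 - c2) n with hc_def
    have hnpos : (0 : Int) < n := by omega
    obtain ⟨hga, hgn⟩ := egcdLoop_dvd a n 1 0
    have hgpos := egcdLoop_pos a n 1 0 hnpos
    have hlin : n ∣ ((egcdLoop a n 1 0).1 - (egcdLoop a n 1 0).2 * a) :=
      egcdLoop_lin a n a n 1 0 (by simp) (by simp)
    by_cases hg : (egcdLoop a n 1 0).1 = 1
    · rw [if_neg (by simp [hg])]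
      -- the inverse exists: x := inv mod n is in range(1, n) and satisfies the test
      set inv := (egcdLoop a n 1 0).2 with hinv_def
      have hinv : n ∣ (1 - inv * a) := by rw [hg] at hlin; exact hlin
      set x := PySem.Int.mod inv n with hx_def
      have hx0 : 0 ≤ x := PySem.Int.mod_nonneg inv hnpos
      have hxlt : x < n := PySem.Int.mod_lt inv hnpos
      have hxinv : n ∣ (a * x - 1) := by
        obtain ⟨k, hk⟩ : n ∣ (x - inv) :=
          ⟨-(PySem.Int.floordiv inv n), by
            have h := PySem.Int.floordiv_mul_add_mod inv n
            linear_combination h⟩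
        obtain ⟨j, hj⟩ := hinv
        exact ⟨a * k - j, by linear_combination a * hk - hj⟩
      have hxne : x ≠ 0 := by
        intro h0
        rw [h0, mul_zero] at hxinv
        have hd1 : n ∣ (1 : Int) := dvd_neg.mp (by simpa using hxinv)
        have := Int.le_of_dvd one_pos hd1
        omega
      have hmem : x ∈ PySem.List.pyRange 1 n 1 :=
        PySem.List.mem_pyRange_one.mpr ⟨by omega, hxlt⟩
      have hsome : ((PySem.List.pyRange 1 n 1).find?
          (fun y => PySem.Int.mod (a * y) n == 1)).isSome := by
        rw [List.find?_isSome]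
        exact ⟨x, hmem, by simp [pymod_eq_one hn hxinv]⟩
      obtain ⟨m_inv, hfind⟩ := Option.isSome_iff_exists.mp hsome
      rw [hfind]
      have hp : PySem.Int.mod (a * m_inv) n = 1 := by
        have := List.find?_some hfind
        simpa using this
      have hminv : n ∣ (a * m_inv - 1) := pymod_dvd_sub_one hn hp
      -- both m_inv and inv invert a mod n, hence are congruent mod n
      have hcong : n ∣ (m_inv - inv) := by
        obtain ⟨k, hk⟩ := hminv
        obtain ⟨j, hj⟩ := hinv
        exact ⟨inv * k + m_inv * j, by linear_combination inv * hk + m_inv * hj⟩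
      have hm : PySem.Int.mod (c * m_inv) n = PySem.Int.mod (c * inv) n :=
        pymod_congr hnpos (by
          have h := Dvd.dvd.mul_left hcong c
          rwa [mul_sub] at h)
      show some [PySem.Int.mod (c * m_inv) n,
          PySem.Int.mod (c1 - PySem.Int.mod (c * m_inv) n * p1) n]
        = some [PySem.Int.mod (c * inv) n,
          PySem.Int.mod (c1 - PySem.Int.mod (c * inv) n * p1) n]
      rw [hm]
    · -- g ≠ 1: since g > 0 divides a and n, no residue can invert a mod n
      rw [if_pos (by simp [hg])]
      have hnone : (PySem.List.pyRange 1 n 1).find?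
          (fun y => PySem.Int.mod (a * y) n == 1) = none := by
        rw [List.find?_eq_none]
        intro y _ hy
        have hp : PySem.Int.mod (a * y) n = 1 := by simpa using hy
        have h1 : n ∣ (a * y - 1) := pymod_dvd_sub_one hn hp
        have hg1 : (egcdLoop a n 1 0).1 ∣ 1 := by
          have h2 : (egcdLoop a n 1 0).1 ∣ a * y := Dvd.dvd.mul_right hga y
          have h3 : (egcdLoop a n 1 0).1 ∣ a * y - 1 := dvd_trans hgn h1
          simpa using dvd_sub h2 h3
        exact hg (Int.eq_one_of_dvd_one (by omega) hg1)
      rw [hnone]
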